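-- pv_equiv track=rewrite | github.com/emilydumas/pmls05-demo | demo/scc.py | reduce_word
-- ===== SOURCE A (Python) =====
-- def reduce_word(w0):
--     w = ()
--     for x in w0:
--         if len(w)>0 and (w[-1] == -x):
--             w = w[:-1]
--         else:
--             w = w + (x,)
--     return w
-- ===== SOURCE B (Python) =====
-- def reduce_word(w0):
--     # Fixpoint algorithm: repeatedly delete the first adjacent inverse pair
--     # until none remains; correct because free-group reduction is confluent.
--     # Each scan is O(n) and only a deletion triggers a rescan.
--     w = list(w0)
--     while True:
--         for i in range(len(w) - 1):
--             if w[i] == -w[i + 1]: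
--                 del w[i:i + 2]
--                 break
--         else:
--             return tuple(w)
-- ===== Notes on version B (the rewrite author's own statement) =====
-- stated objective: alternative
-- what changed: Replaces the single left-to-right pass that rebuilds the whole tuple on every step (Theta(n^2) always) with a fixpoint algorithm: repeatedly scan for and delete the first adjacent inverse pair until a scan finds none, correct by confluence of free-group reduction; each scan is O(n) and only deletions trigger a rescan, so it is O(n) when few pairs cancel (measured much faster), though worst case is still O(n^2).
import Mathlib
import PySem

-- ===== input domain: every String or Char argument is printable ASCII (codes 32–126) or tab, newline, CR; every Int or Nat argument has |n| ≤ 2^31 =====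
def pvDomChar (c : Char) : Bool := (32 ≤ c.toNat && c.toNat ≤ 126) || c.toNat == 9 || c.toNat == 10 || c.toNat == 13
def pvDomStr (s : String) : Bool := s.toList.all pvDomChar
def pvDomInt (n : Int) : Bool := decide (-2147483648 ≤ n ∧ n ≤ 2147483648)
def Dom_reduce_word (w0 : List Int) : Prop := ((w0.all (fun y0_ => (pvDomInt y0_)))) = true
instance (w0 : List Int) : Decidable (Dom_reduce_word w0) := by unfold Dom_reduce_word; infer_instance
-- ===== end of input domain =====

-- B replaces A's single left-to-right cancelling pass with a different algorithm:
-- repeatedly delete the first adjacent inverse pair until none remains (a fixpoint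
-- iteration, correct because one-pair deletion preserves the reduced form);
-- objective: alternative algorithm; a timing run measured B much faster (A rebuilds the whole tuple each step).

-- ===== PORT A =====
-- A: w starts as (); for each x, if w nonempty and w[-1] == -x then w = w[:-1] else w = w + (x,)
def reduce_word (w0 : List Int) : List Int :=
  w0.foldl (fun w x =>
    if w.length > 0 ∧ PySem.List.pyGet? w (-1) = some (-x)
    then PySem.List.slice w none (some (-1))
    else w ++ [x]) []

-- ===== PORT B =====
-- B's inner for-loop: scan left to right for the first i with w[i] == -w[i+1];
-- if found, perform 'del w[i:i+2]' and return the shortened list, else none (for-else).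
def cancelFirst : List Int → Option (List Int)
  | a :: b :: t => if a = -b then some t else (cancelFirst (b :: t)).map (a :: ·)
  | _ => none

-- termination helper for the port of B's 'while True' loop: each deletion shortens w
theorem cancelFirst_length (w w' : List Int) (h : cancelFirst w = some w') :
    w'.length < w.length := by
  induction w generalizing w' with
  | nil => simp [cancelFirst] at h
  | cons a t ih =>
    match t with
    | [] => simp [cancelFirst] at h
    | b :: t =>
      by_cases hab : a = -b
      · simp [cancelFirst, hab] at h
        subst h; simp
      · simp [cancelFirst, hab] at h
        obtain ⟨u, hu, rfl⟩ := h
        have h2 := ih u hu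
        simp at h2 ⊢
        omega

-- B's 'while True' loop: rescan and delete until a full scan finds no pair.
def reduce_word_alt (w0 : List Int) : List Int :=
  match _h : cancelFirst w0 with
  | some w' => reduce_word_alt w'
  | none => w0
termination_by w0.length
decreasing_by exact cancelFirst_length _ _ _h

-- ===== PRECONDITION & SPEC =====
def Spec_reduce_word (w0 : List Int) (out : List Int) : Prop := out = reduce_word_alt w0
instance (w0 : List Int) (out : List Int) : Decidable (Spec_reduce_word w0 out) := by unfold Spec_reduce_word; infer_instance

-- ===== CLAIM (what is proved, stated in full; the proofs are below) =====
def Claim_equal_reduce_word : Prop := ∀ (w0 : List Int), Dom_reduce_word w0 → Spec_reduce_word w0 (reduce_word w0)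

-- ===== LEMMAS AND PROOFS =====

-- canonical "prepend with cancellation" step; List.foldr fstep [] is the reduced word,
-- the common normal form both programs are shown to compute
def fstep (a : Int) (r : List Int) : List Int :=
  match r with
  | h :: t => if h = -a then t else a :: h :: t
  | [] => [a]

-- A's loop step in clean form (last element / dropLast)
def gstep (w : List Int) (x : Int) : List Int :=
  if w.getLast? = some (-x) then w.dropLast else w ++ [x]

theorem stepA_eq_gstep (w : List Int) (x : Int) :
    (if w.length > 0 ∧ PySem.List.pyGet? w (-1) = some (-x)
     then PySem.List.slice w none (some (-1))
     else w ++ [x]) = gstep w x := by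
  induction w using List.reverseRecOn with
  | nil => simp [gstep]
  | append_singleton as a _ =>
    by_cases h : a = -x
    · simp [gstep, h, PySem.List.pyGet?_neg_one_append_singleton, PySem.List.slice_to_neg_one]
    · simp [gstep, h, PySem.List.pyGet?_neg_one_append_singleton]

-- the end-cancellation step commutes with the front-cancellation step (confluence core)
theorem comm_step (r : List Int) (a x : Int) :
    gstep (fstep a r) x = fstep a (gstep r x) := by
  rcases r with _ | ⟨h1, _ | ⟨h2, t⟩⟩
  · by_cases h : a = -x
    · subst h; simp [gstep, fstep]
    · simp [gstep, fstep, h, show ¬(x = -a) by omega]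
  · by_cases hh : h1 = -a
    · subst hh
      by_cases hx : a = x
      · subst hx; simp [gstep, fstep]
      · simp [gstep, fstep, show ¬(-a = -x) by omega]
    · by_cases hx : h1 = -x
      · subst hx; simp [gstep, fstep, hh]
      · simp [gstep, fstep, hh, hx]
  · by_cases hh : h1 = -a
    · subst hh
      simp only [fstep, gstep]
      by_cases hl : (h2 :: t).getLast? = some (-x)
      · simp [List.getLast?_cons_cons, hl]
      · simp [List.getLast?_cons_cons, hl]
    · simp only [fstep, if_neg hh, gstep, List.getLast?_cons_cons]
      by_cases hl : (h2 :: t).getLast? = some (-x)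
      · rw [if_pos hl, if_pos hl]
        simp [hh]
      · rw [if_neg hl, if_neg hl]
        simp [hh]

theorem foldl_gstep_fstep (l : List Int) (r : List Int) (a : Int) :
    l.foldl gstep (fstep a r) = fstep a (l.foldl gstep r) := by
  induction l generalizing r with
  | nil => rfl
  | cons x l ih => simp only [List.foldl_cons, comm_step]; exact ih _

-- A computes the foldr normal form
theorem reduce_word_eq_foldr (l : List Int) :
    reduce_word l = l.foldr fstep [] := by
  unfold reduce_word
  have hf : (fun (w : List Int) (x : Int) =>
      if w.length > 0 ∧ PySem.List.pyGet? w (-1) = some (-x)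
      then PySem.List.slice w none (some (-1))
      else w ++ [x]) = gstep := by
    funext w x; exact stepA_eq_gstep w x
  rw [hf]
  induction l with
  | nil => rfl
  | cons a l ih =>
    have h0 : gstep [] a = fstep a [] := by simp [gstep, fstep]
    simp only [List.foldl_cons, List.foldr_cons, h0, foldl_gstep_fstep, ih]

-- reduced words: no adjacent inverse pair
def Reduced (w : List Int) : Prop := List.IsChain (fun p q => p ≠ -q) w

theorem reduced_fstep (a : Int) (r : List Int) (h : Reduced r) : Reduced (fstep a r) := by
  match r with
  | [] => simp [fstep, Reduced]
  | h1 :: t =>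
    by_cases hh : h1 = -a
    · simp only [fstep, if_pos hh]
      exact ((List.isChain_cons).mp h).2
    · simp only [fstep, if_neg hh]
      exact (List.isChain_cons_cons).mpr ⟨by omega, h⟩

theorem reduced_foldr (l : List Int) : Reduced (l.foldr fstep []) := by
  induction l with
  | nil => simp [Reduced]
  | cons a l ih => exact reduced_fstep a _ ih

theorem foldr_eq_self_of_reduced (w : List Int) (h : Reduced w) : w.foldr fstep [] = w := by
  induction w with
  | nil => rfl
  | cons a t ih =>
    have ht : Reduced t := ((List.isChain_cons).mp h).2
    simp only [List.foldr_cons, ih ht]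
    match t with
    | [] => rfl
    | b :: t' =>
      have hab : a ≠ -b := (List.isChain_cons_cons.mp h).1
      simp [fstep, show ¬(b = -a) by omega]

theorem fstep_inv_cancel (a : Int) (r : List Int) (h : Reduced r) :
    fstep a (fstep (-a) r) = r := by
  rcases r with _ | ⟨h1, _ | ⟨b, t'⟩⟩
  · simp [fstep]
  · by_cases hh : h1 = a
    · simp [fstep, show h1 = - -a by omega]
    · simp [fstep, hh]
  · have hb : h1 ≠ -b := (List.isChain_cons_cons.mp h).1
    by_cases hh : h1 = a
    · simp [fstep, show h1 = - -a by omega, show ¬(b = -a) by omega]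
    · simp [fstep, hh]

theorem cancelFirst_none_reduced (w : List Int) (h : cancelFirst w = none) : Reduced w := by
  induction w with
  | nil => simp [Reduced]
  | cons a t ih =>
    match t with
    | [] => simp [Reduced]
    | b :: t' =>
      by_cases hab : a = -b
      · simp [cancelFirst, hab] at h
      · simp [cancelFirst, hab] at h
        exact List.isChain_cons_cons.mpr ⟨hab, ih h⟩

-- deleting one adjacent inverse pair preserves the foldr normal form
theorem cancelFirst_some_foldr (w w' : List Int) (h : cancelFirst w = some w') :
    w'.foldr fstep [] = w.foldr fstep [] := by
  induction w generalizing w' with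
  | nil => simp [cancelFirst] at h
  | cons a t ih =>
    match t with
    | [] => simp [cancelFirst] at h
    | b :: t' =>
      by_cases hab : a = -b
      · simp [cancelFirst, hab] at h
        subst h
        simp only [List.foldr_cons]
        rw [hab]
        have h2 := fstep_inv_cancel (-b) (t'.foldr fstep []) (reduced_foldr t')
        rw [neg_neg] at h2
        exact h2.symm
      · simp [cancelFirst, hab] at h
        obtain ⟨u, hu, rfl⟩ := h
        simp only [List.foldr_cons, ih u hu]

-- B computes the same foldr normal form
theorem reduce_word_alt_eq_foldr (l : List Int) :
    reduce_word_alt l = l.foldr fstep [] := by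
  induction l using reduce_word_alt.induct with
  | case1 w w' h ih =>
    rw [reduce_word_alt.eq_def]
    split
    · rename_i u hu
      rw [h] at hu
      injection hu with hu
      subst hu
      rw [ih, cancelFirst_some_foldr w w' h]
    · rename_i hu
      rw [h] at hu
      cases hu
  | case2 w h =>
    rw [reduce_word_alt.eq_def]
    split
    · rename_i u hu
      rw [h] at hu
      cases hu
    · exact (foldr_eq_self_of_reduced w (cancelFirst_none_reduced w h)).symm

-- ===== VERDICT (by name: the statement is the Claim_ definition above) =====
theorem reduce_word_spec : Claim_equal_reduce_word := by
  intro w0 _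
  unfold Spec_reduce_word
  rw [reduce_word_eq_foldr, reduce_word_alt_eq_foldr]
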